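-- pv_equiv track=rewrite | github.com/amir-f34/SublimeAlgo | server/task_single.py | gene_list
-- ===== SOURCE A (Python) =====
-- def gene_list(chromosome):
--     genes = list()
--     i = 0
--     while i < len(chromosome):
--         char = chromosome[i]
--         if char in "abcdefghijk":
--             genes.append(char)
--             i += 1
--         elif char == "s":
--             genes.append(chromosome[i : i + 3])
--             i += 3
--         else:
--             i += 1
--     return genes
-- ===== SOURCE B (Python) =====
-- import re
--
-- _GENE = re.compile(r"[a-k]|s.{0,2}", re.DOTALL)
--
-- def gene_list(chromosome):
--     return _GENE.findall(chromosome)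
-- ===== Notes on version B (the rewrite author's own statement) =====
-- stated objective: idiomatic
-- what changed: Replaced the hand-written index/slice while-loop with a single compiled-regex findall ([a-k]|s.{0,2} with DOTALL) whose automaton emits the same tokens in one scan inside the C regex engine.
import Mathlib
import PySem

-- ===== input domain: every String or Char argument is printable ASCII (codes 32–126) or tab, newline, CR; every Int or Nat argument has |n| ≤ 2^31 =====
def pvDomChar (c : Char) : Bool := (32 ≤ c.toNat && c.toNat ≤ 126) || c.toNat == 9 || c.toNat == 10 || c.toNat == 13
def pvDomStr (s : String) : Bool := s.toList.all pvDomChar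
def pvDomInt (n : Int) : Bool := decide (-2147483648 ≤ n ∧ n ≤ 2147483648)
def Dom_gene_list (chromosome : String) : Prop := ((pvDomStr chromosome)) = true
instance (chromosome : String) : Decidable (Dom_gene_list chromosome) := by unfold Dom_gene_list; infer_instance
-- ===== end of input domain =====

-- B replaces A's manual index/slice loop by a single regex findall of [a-k]|s.{0,2} (DOTALL); objective: idiomatic.

-- ===== PORT A =====
-- A's while loop over index i; i strictly increases each iteration, so recursion on s.length - i.
def geneListAux (s : List Char) (i : Nat) : List String :=
  if h : i < s.length then
    let c := s[i]
    if ['a','b','c','d','e','f','g','h','i','j','k'].contains c then  -- char in "abcdefghijk"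
      String.ofList [c] :: geneListAux s (i + 1)
    else if c = 's' then
      String.ofList ((s.drop i).take 3) :: geneListAux s (i + 3)      -- chromosome[i:i+3]
    else
      geneListAux s (i + 1)
  else []
termination_by s.length - i

def gene_list (chromosome : String) : List String :=
  geneListAux chromosome.toList 0

-- ===== PORT B =====
-- The automaton of the regex [a-k]|s.{0,2} with DOTALL, as re.findall scans it:
-- at each position emit an a–k letter, or an 's' plus up to two following chars, else skip one char.
def geneScan : List Char → List String
  | [] => []
  | c :: rest =>
    if 'a' ≤ c ∧ c ≤ 'k' then
      String.ofList [c] :: geneScan rest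
    else if c = 's' then
      String.ofList (c :: rest.take 2) :: geneScan (rest.drop 2)
    else
      geneScan rest
termination_by l => l.length
decreasing_by all_goals (simp [List.length_drop]; try omega)

def gene_list_alt (chromosome : String) : List String :=
  geneScan chromosome.toList

-- ===== PRECONDITION & SPEC =====
def Spec_gene_list (chromosome : String) (out : List String) : Prop := out = gene_list_alt chromosome
instance (chromosome : String) (out : List String) : Decidable (Spec_gene_list chromosome out) := by unfold Spec_gene_list; infer_instance

-- ===== CLAIM (what is proved, stated in full; the proofs are below) =====
def Claim_equal_gene_list : Prop := ∀ (chromosome : String), Dom_gene_list chromosome → Spec_gene_list chromosome (gene_list chromosome)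

-- ===== LEMMAS AND PROOFS =====

theorem char_eq_iff_toNat (c d : Char) : c = d ↔ c.toNat = d.toNat :=
  ⟨fun h => h ▸ rfl, fun h => Char.ext (UInt32.toNat_inj.mp h)⟩

-- the character class [a-k] tests the same set as membership in "abcdefghijk"
theorem mem_abck_iff (c : Char) :
    (['a','b','c','d','e','f','g','h','i','j','k'].contains c = true) ↔ ('a' ≤ c ∧ c ≤ 'k') := by
  simp only [List.contains_eq_mem, List.mem_cons, List.not_mem_nil, or_false, decide_eq_true_eq]
  constructor
  · rintro (rfl|rfl|rfl|rfl|rfl|rfl|rfl|rfl|rfl|rfl|rfl) <;> exact ⟨by decide, by decide⟩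
  · rintro ⟨h1, h2⟩
    have hv1 : 97 ≤ c.toNat := by exact_mod_cast Char.le_def.mp h1
    have hv2 : c.toNat ≤ 107 := by exact_mod_cast Char.le_def.mp h2
    simp only [char_eq_iff_toNat, show ('a':Char).toNat = 97 from rfl,
      show ('b':Char).toNat = 98 from rfl, show ('c':Char).toNat = 99 from rfl,
      show ('d':Char).toNat = 100 from rfl, show ('e':Char).toNat = 101 from rfl,
      show ('f':Char).toNat = 102 from rfl, show ('g':Char).toNat = 103 from rfl,
      show ('h':Char).toNat = 104 from rfl, show ('i':Char).toNat = 105 from rfl,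
      show ('j':Char).toNat = 106 from rfl, show ('k':Char).toNat = 107 from rfl]
    omega

theorem geneListAux_eq_scan (s : List Char) (i : Nat) :
    geneListAux s i = geneScan (s.drop i) := by
  fun_induction geneListAux s i with
  | case1 i h c hmem ih =>
    have hd : s.drop i = s[i] :: s.drop (i + 1) := List.drop_eq_getElem_cons h
    rw [hd, geneScan, if_pos ((mem_abck_iff _).mp hmem), ih]
  | case2 i h c hmem hs ih =>
    have hd : s.drop i = s[i] :: s.drop (i + 1) := List.drop_eq_getElem_cons h
    have hneg : ¬ ('a' ≤ s[i] ∧ s[i] ≤ 'k') := fun hc => hmem ((mem_abck_iff _).mpr hc)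
    rw [hd, geneScan, if_neg hneg, if_pos hs, ih]
    have hdrop : (s.drop (i + 1)).drop 2 = s.drop (i + 3) := by
      rw [List.drop_drop]
    rw [hdrop, List.take_cons (by omega)]
  | case3 i h c hmem hs ih =>
    have hd : s.drop i = s[i] :: s.drop (i + 1) := List.drop_eq_getElem_cons h
    have hneg : ¬ ('a' ≤ s[i] ∧ s[i] ≤ 'k') := fun hc => hmem ((mem_abck_iff _).mpr hc)
    rw [hd, geneScan, if_neg hneg, if_neg hs, ih]
  | case4 i h =>
    rw [List.drop_of_length_le (by omega), geneScan]

-- ===== VERDICT (by name: the statement is the Claim_ definition above) =====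
theorem gene_list_spec : Claim_equal_gene_list := by
  intro c _
  unfold Spec_gene_list gene_list gene_list_alt
  simpa using geneListAux_eq_scan c.toList 0
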